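-- pv_equiv track=rewrite | github.com/areyeslo/namex | api/namex/services/name_request/auto_analyse/name_analysis_utils.py | list_distinctive_descriptive
-- ===== SOURCE A (Python) =====
-- import collections
--
-- def list_distinctive_descriptive(name_list, dist_list, desc_list):
--     queue_dist = collections.deque(dist_list)
--     dist_list_tmp, dist_list_all, desc_list_tmp, desc_list_all = [], [], [], []
--
--     dist_list_tmp.append(list(queue_dist))
--
--     while len(queue_dist) > 1:
--         queue_dist.pop()
--         dist_list_tmp.append(list(queue_dist))
--
--     dist_list_tmp.reverse()
--
--     for dist in dist_list_tmp:
--         desc_list_tmp.append([i for i in name_list if i not in dist and i in desc_list])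
--
--     # Validate generation of list of lists of distinctives and descriptives with the correct combinations:
--     for idx, element in enumerate(dist_list_tmp):
--         if dist_list_tmp[idx] + desc_list_tmp[idx] == name_list:
--             dist_list_all.append(dist_list_tmp[idx])
--             desc_list_all.append(desc_list_tmp[idx])
--
--     for idx, element in enumerate(dist_list_all):
--         if len(dist_list_all) > 1 and (len(dist_list_all[idx]) == 0 or len(desc_list_all[idx]) == 0):
--             del dist_list_all[idx]
--             del desc_list_all[idx]
--
--     if len(dist_list_all) == 0 and len(desc_list_all) == 0:
--         return [dist_list_all], [desc_list_all]
--
--     return dist_list_all, desc_list_all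
-- ===== SOURCE B (Python) =====
-- def list_distinctive_descriptive(name_list, dist_list, desc_list):
--     # Decide each split point directly: a prefix length k is valid iff name_list
--     # starts with dist_list[:k] and every remaining word is descriptive-eligible;
--     # stop as soon as the prefix stops matching (no later k can be valid).
--     dist_all, desc_all = [], []
--     k = 1 if dist_list else 0
--     while k <= len(dist_list) and name_list[:k] == dist_list[:k]:
--         tail = name_list[k:]
--         if all(w in desc_list and w not in dist_list[:k] for w in tail):
--             dist_all.append(name_list[:k])
--             desc_all.append(tail)
--         k += 1
--     # at most the final entry can have an empty descriptive part
--     if len(dist_all) > 1 and not desc_all[-1]: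
--         dist_all.pop()
--         desc_all.pop()
--     if not dist_all:
--         return [dist_all], [desc_all]
--     return dist_all, desc_all
-- ===== Notes on version B (the rewrite author's own statement) =====
-- stated objective: alternative
-- what changed: Instead of A's generate-and-test (build every dist_list prefix via deque pops, materialize each filtered descriptive list, compare dist+desc==name_list, then run an index-deleting prune loop), B scans split points left-to-right with an early break as soon as name_list stops matching the dist_list prefix, tests validity by a direct predicate (suffix words descriptive-eligible) without constructing/comparing candidate concatenations, and replaces the enumerate/del prune loop by a single pop of the last entry (provably the only one the prune can ever remove).
import Mathlib
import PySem

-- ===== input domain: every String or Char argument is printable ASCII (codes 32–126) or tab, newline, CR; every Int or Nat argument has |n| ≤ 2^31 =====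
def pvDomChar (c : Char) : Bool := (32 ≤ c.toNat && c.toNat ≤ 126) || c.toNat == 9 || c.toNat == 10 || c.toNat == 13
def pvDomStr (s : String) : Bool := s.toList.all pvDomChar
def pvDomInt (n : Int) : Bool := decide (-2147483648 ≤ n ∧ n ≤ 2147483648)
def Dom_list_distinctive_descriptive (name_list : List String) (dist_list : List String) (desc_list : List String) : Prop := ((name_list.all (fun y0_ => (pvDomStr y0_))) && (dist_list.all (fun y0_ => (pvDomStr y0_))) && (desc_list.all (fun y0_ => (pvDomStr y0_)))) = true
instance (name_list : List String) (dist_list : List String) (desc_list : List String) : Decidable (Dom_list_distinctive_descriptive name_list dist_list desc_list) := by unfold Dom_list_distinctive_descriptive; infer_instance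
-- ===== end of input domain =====

-- B replaces A's generate-and-test pipeline (deque-pop prefix enumeration, per-prefix filtered
-- lists compared by concatenation, enumerate/del prune) by a left-to-right split-point scan with
-- early break, a direct validity predicate, and a single pop-last prune (objective: alternative).

-- ===== PORT A =====
-- `while len(queue_dist) > 1: queue_dist.pop(); dist_list_tmp.append(list(queue_dist))`
-- (deque.pop() removes the LAST element = List.dropLast; exact)
def pvPopLoop (q : List String) (tmp : List (List String)) : List (List String) :=
  if q.length > 1 then pvPopLoop q.dropLast (tmp ++ [q.dropLast]) else tmp
termination_by q.length
decreasing_by simp [List.length_dropLast]; omega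

-- `for idx, element in enumerate(dist_list_all): if len(...) > 1 and (...): del ...; del ...`
-- Python's list iterator over a list mutated by `del`: an internal cursor i is checked against the
-- CURRENT length each step and always advances; ported exactly.
def pvPrune (i : Nat) (da db : List (List String)) : List (List String) × List (List String) :=
  if i < da.length then
    if da.length > 1 ∧ ((da.getD i []).length = 0 ∨ (db.getD i []).length = 0) then
      pvPrune (i+1) (da.eraseIdx i) (db.eraseIdx i)
    else pvPrune (i+1) da db
  else (da, db)
termination_by da.length + 1 - i
decreasing_by all_goals (simp_all [List.length_eraseIdx]; omega)

def list_distinctive_descriptive (name_list : List String) (dist_list : List String) (desc_list : List String) : List (List String) × List (List String) :=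
  let dist_list_tmp := (pvPopLoop dist_list [dist_list]).reverse
  let desc_list_tmp := dist_list_tmp.map (fun dist =>
    name_list.filter (fun i => !dist.contains i && desc_list.contains i))
  let p := (PySem.List.enumerate dist_list_tmp 0).foldl
    (fun (acc : List (List String) × List (List String)) pr =>
      if PySem.List.pyGetD dist_list_tmp pr.1 [] ++ PySem.List.pyGetD desc_list_tmp pr.1 [] = name_list then
        (acc.1 ++ [PySem.List.pyGetD dist_list_tmp pr.1 []], acc.2 ++ [PySem.List.pyGetD desc_list_tmp pr.1 []])
      else acc) ([], [])
  let q := pvPrune 0 p.1 p.2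
  -- `return [dist_list_all], [desc_list_all]`: in this branch both lists are [], so the wrapped
  -- value is ([[]], [[]]) (the Python value [[]], [[]]); written as that literal to keep the type
  if q.1.length = 0 ∧ q.2.length = 0 then ([[]], [[]]) else (q.1, q.2)

-- ===== PORT B =====
-- `while k <= len(dist_list) and name_list[:k] == dist_list[:k]: ...` — k is a nonnegative int
-- counter, so the slices `[:k]` / `[k:]` are List.take / List.drop (exact for 0 ≤ k)
def pvBLoop (name_list dist_list desc_list : List String) (k : Nat)
    (acc : List (List String) × List (List String)) : List (List String) × List (List String) :=
  if k ≤ dist_list.length ∧ name_list.take k = dist_list.take k then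
    let tail := name_list.drop k
    pvBLoop name_list dist_list desc_list (k+1)
      (if tail.all (fun w => desc_list.contains w && !(dist_list.take k).contains w)
        then (acc.1 ++ [name_list.take k], acc.2 ++ [tail]) else acc)
  else acc
termination_by dist_list.length + 1 - k
decreasing_by omega

def list_distinctive_descriptive_alt (name_list : List String) (dist_list : List String) (desc_list : List String) : List (List String) × List (List String) :=
  let p := pvBLoop name_list dist_list desc_list (if dist_list ≠ [] then 1 else 0) ([], [])
  -- `if len(dist_all) > 1 and not desc_all[-1]: dist_all.pop(); desc_all.pop()`
  let q := if p.1.length > 1 ∧ PySem.List.pyGetD p.2 (-1) [] = [] then (p.1.dropLast, p.2.dropLast) else p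
  -- `return [dist_all], [desc_all]`: dist_all is [] here and so is desc_all (entries are always
  -- appended and popped in pairs), so the wrapped value is ([[]], [[]]); written as that literal
  if q.1 = [] then ([[]], [[]]) else q

-- ===== PRECONDITION & SPEC =====
def Spec_list_distinctive_descriptive (name_list : List String) (dist_list : List String) (desc_list : List String) (out : List (List String) × List (List String)) : Prop := out = list_distinctive_descriptive_alt name_list dist_list desc_list
instance (name_list : List String) (dist_list : List String) (desc_list : List String) (out : List (List String) × List (List String)) : Decidable (Spec_list_distinctive_descriptive name_list dist_list desc_list out) := by unfold Spec_list_distinctive_descriptive; infer_instance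

-- ===== CLAIM (what is proved, stated in full; the proofs are below) =====
def Claim_equal_list_distinctive_descriptive : Prop := ∀ (name_list : List String) (dist_list : List String) (desc_list : List String), Dom_list_distinctive_descriptive name_list dist_list desc_list → Spec_list_distinctive_descriptive name_list dist_list desc_list (list_distinctive_descriptive name_list dist_list desc_list)

-- ===== LEMMAS AND PROOFS =====

-- canonical prefix list both generation passes range over
def pvCanon (q : List String) : List (List String) :=
  if q = [] then [[]] else (List.range' 1 q.length).map q.take

-- the descriptive filter and A's per-prefix step
def pvFilt (name_list desc_list d : List String) : List String :=
  name_list.filter (fun i => !d.contains i && desc_list.contains i)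

def pvF (name_list desc_list : List String) (acc : List (List String) × List (List String)) (dist : List String) : List (List String) × List (List String) :=
  if dist ++ pvFilt name_list desc_list dist = name_list then
    (acc.1 ++ [dist], acc.2 ++ [pvFilt name_list desc_list dist])
  else acc

lemma pvPopLoop_eq (q : List String) (tmp : List (List String)) :
    pvPopLoop q tmp = tmp ++ ((List.range' 1 (q.length - 1)).map q.take).reverse := by
  fun_induction pvPopLoop q tmp with
  | case1 q tmp h ih =>
    rw [ih]
    have hlen : q.dropLast.length = q.length - 1 := by simp
    have htake : ∀ k ∈ List.range' 1 (q.dropLast.length - 1), q.dropLast.take k = q.take k := by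
      intro k hk
      rw [List.mem_range'] at hk
      rw [List.dropLast_eq_take, List.take_take]
      congr 1
      omega
    rw [List.map_congr_left htake, hlen]
    have hsplit : List.range' 1 (q.length - 1) = List.range' 1 (q.length - 2) ++ [q.length - 1] := by
      have h2 : q.length - 1 = (q.length - 2) + 1 := by omega
      rw [h2, List.range'_concat]
      congr 2
      omega
    rw [hsplit]
    simp [List.dropLast_eq_take]
    have h3 : q.length - 1 - 1 = q.length - 2 := by omega
    rw [h3]
  | case2 q tmp h =>
    have h0 : q.length - 1 = 0 := by omega
    simp [h0]

lemma pvTmpA_eq (q : List String) : (pvPopLoop q [q]).reverse = pvCanon q := by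
  rw [pvPopLoop_eq]
  rcases eq_or_ne q [] with rfl | hq
  · simp [pvCanon]
  · have hn : 0 < q.length := List.length_pos_iff.mpr hq
    simp only [pvCanon, if_neg hq, List.reverse_append, List.reverse_reverse,
      List.reverse_cons, List.reverse_nil, List.nil_append]
    have hsplit : List.range' 1 q.length = List.range' 1 (q.length - 1) ++ [q.length] := by
      have h2 : q.length = (q.length - 1) + 1 := by omega
      conv_lhs => rw [h2, List.range'_concat]
      congr 2
      omega
    rw [hsplit]
    simp

-- A's validation loop (enumerate + int indexing) = fold of pvF over the prefix list
lemma pvA_fold (name_list desc_list : List String) (C : List (List String)) :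
    (PySem.List.enumerate C 0).foldl
      (fun (acc : List (List String) × List (List String)) pr =>
        if PySem.List.pyGetD C pr.1 [] ++ PySem.List.pyGetD (C.map (fun dist => name_list.filter (fun i => !dist.contains i && desc_list.contains i))) pr.1 [] = name_list then
          (acc.1 ++ [PySem.List.pyGetD C pr.1 []], acc.2 ++ [PySem.List.pyGetD (C.map (fun dist => name_list.filter (fun i => !dist.contains i && desc_list.contains i))) pr.1 []])
        else acc) ([], [])
    = C.foldl (pvF name_list desc_list) ([], []) := by
  rw [PySem.List.enumerate_eq_map_pyRange C ([] : List String), List.foldl_map]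
  rw [← PySem.List.foldl_pyRange_zero_pyGetD' C ([] : List String) (pvF name_list desc_list) ([], [])]
  apply PySem.List.foldl_congr_mem
  intro acc j hj
  rw [PySem.List.mem_pyRange_one] at hj
  have hg : PySem.List.pyGetD (C.map (fun dist => name_list.filter (fun i => !dist.contains i && desc_list.contains i))) j []
      = (fun dist => name_list.filter (fun i => !dist.contains i && desc_list.contains i)) (PySem.List.pyGetD C j []) := by
    rw [PySem.List.pyGetD_eq_getElem _ _ hj.1 (by simpa using hj.2),
        PySem.List.pyGetD_eq_getElem _ _ hj.1 (by simpa using hj.2)]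
    simp
  rw [hg]
  rfl

-- ---- characterization of A's per-prefix condition at d = q.take k ----
lemma pvCond_prefix (name_list desc_list q : List String) (k : Nat) (hk : k ≤ q.length)
    (h : q.take k ++ pvFilt name_list desc_list (q.take k) = name_list) :
    name_list.take k = q.take k := by
  have hpre : q.take k <+: name_list := ⟨_, h⟩
  have hlen : (q.take k).length = k := by simp [hk]
  have := List.prefix_iff_eq_take.mp hpre
  rw [this, hlen]

lemma pvFilt_eq_drop (name_list desc_list q : List String) (k : Nat)
    (hm : name_list.take k = q.take k)
    (hall : ∀ w ∈ name_list.drop k, (desc_list.contains w && !(q.take k).contains w) = true) :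
    pvFilt name_list desc_list (q.take k) = name_list.drop k := by
  conv_lhs => rw [pvFilt, ← List.take_append_drop k name_list, List.filter_append]
  have h1 : (name_list.take k).filter (fun i => !(q.take k).contains i && desc_list.contains i) = [] := by
    rw [List.filter_eq_nil_iff]
    intro a ha
    rw [hm] at ha
    simp only [Bool.and_eq_true, Bool.not_eq_true', List.contains_eq_mem, decide_eq_false_iff_not]
    exact fun h' => absurd ha h'.1
  have h2 : (name_list.drop k).filter (fun i => !(q.take k).contains i && desc_list.contains i) = name_list.drop k := by
    rw [List.filter_eq_self]
    intro a ha
    have := hall a ha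
    simp_all
  rw [h1, h2, List.nil_append]

lemma pvCond_iff (name_list desc_list q : List String) (k : Nat) (_hk : k ≤ q.length)
    (hm : name_list.take k = q.take k) :
    (q.take k ++ pvFilt name_list desc_list (q.take k) = name_list) ↔
      (name_list.drop k).all (fun w => desc_list.contains w && !(q.take k).contains w) = true := by
  constructor
  · intro h
    have hdrop : pvFilt name_list desc_list (q.take k) = name_list.drop k := by
      have hsplit : q.take k ++ name_list.drop k = name_list := by
        conv_rhs => rw [← List.take_append_drop k name_list]
        rw [hm]
      have := h.trans hsplit.symm
      exact List.append_cancel_left this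
    rw [List.all_eq_true]
    intro w hw
    rw [← hdrop] at hw
    have := List.of_mem_filter hw
    simp_all
  · intro h
    rw [List.all_eq_true] at h
    rw [pvFilt_eq_drop name_list desc_list q k hm h]
    conv_rhs => rw [← List.take_append_drop k name_list]
    rw [hm]

-- if the prefixes stop matching at k, no later prefix can be valid
lemma pvCond_fail (name_list desc_list q : List String) (k k' : Nat) (hk : k ≤ k')
    (hk' : k' ≤ q.length) (hfail : name_list.take k ≠ q.take k) :
    ¬ (q.take k' ++ pvFilt name_list desc_list (q.take k') = name_list) := by
  intro h
  have hm := pvCond_prefix name_list desc_list q k' hk' h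
  apply hfail
  have : (name_list.take k').take k = (q.take k').take k := by rw [hm]
  simpa [List.take_take, Nat.min_eq_left hk] using this

lemma pvFoldF_id (name_list desc_list : List String) (C : List (List String))
    (acc : List (List String) × List (List String))
    (h : ∀ d ∈ C, ¬ (d ++ pvFilt name_list desc_list d = name_list)) :
    C.foldl (pvF name_list desc_list) acc = acc := by
  induction C generalizing acc with
  | nil => rfl
  | cons x xs ih =>
    rw [List.foldl_cons, pvF, if_neg (h x (List.mem_cons_self))]
    exact ih acc (fun d hd => h d (List.mem_cons_of_mem x hd))

-- B's scan computes the fold of pvF over the remaining prefixes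
lemma pvBLoop_eq (name_list q desc_list : List String) (k : Nat)
    (acc : List (List String) × List (List String)) :
    pvBLoop name_list q desc_list k acc
      = ((List.range' k (q.length + 1 - k)).map q.take).foldl (pvF name_list desc_list) acc := by
  fun_induction pvBLoop name_list q desc_list k acc with
  | case1 k acc h tail ih =>
    obtain ⟨hk, hm⟩ := h
    have htail : tail = name_list.drop k := rfl
    have hsplit : List.range' k (q.length + 1 - k) = k :: List.range' (k+1) (q.length + 1 - (k+1)) := by
      have h2 : q.length + 1 - k = (q.length + 1 - (k+1)) + 1 := by omega
      rw [h2, List.range'_succ]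
    simp only [dite_eq_ite] at ih
    rw [hsplit, List.map_cons, List.foldl_cons, ih]
    congr 1
    rw [htail] at *
    by_cases hall : ((name_list.drop k).all (fun w => desc_list.contains w && !(q.take k).contains w)) = true
    · rw [if_pos hall, pvF,
        if_pos ((pvCond_iff name_list desc_list q k hk hm).mpr hall),
        pvFilt_eq_drop name_list desc_list q k hm (List.all_eq_true.mp hall), ← hm]
    · rw [if_neg hall, pvF,
        if_neg (fun hc => hall ((pvCond_iff name_list desc_list q k hk hm).mp hc))]
  | case2 k acc h =>
    rw [not_and_or] at h
    rcases h with hk | hm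
    · have : q.length + 1 - k = 0 := by omega
      simp [this]
    · by_cases hk : k ≤ q.length
      · rw [pvFoldF_id]
        intro d hd
        rw [List.mem_map] at hd
        obtain ⟨k', hk', rfl⟩ := hd
        rw [List.mem_range'] at hk'
        exact pvCond_fail name_list desc_list q k k' (by omega) (by omega) hm
      · have : q.length + 1 - k = 0 := by omega
        simp [this]

-- the fold of pvF is a filter + map
lemma pvFoldF_filter (name_list desc_list : List String) (C : List (List String))
    (a b : List (List String)) :
    C.foldl (pvF name_list desc_list) (a, b)
      = (a ++ C.filter (fun d => d ++ pvFilt name_list desc_list d = name_list),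
         b ++ (C.filter (fun d => d ++ pvFilt name_list desc_list d = name_list)).map (pvFilt name_list desc_list)) := by
  induction C generalizing a b with
  | nil => simp
  | cons x xs ih =>
    rw [List.foldl_cons, pvF]
    by_cases hc : x ++ pvFilt name_list desc_list x = name_list
    · rw [if_pos hc, ih]
      simp [hc]
    · rw [if_neg hc, ih]
      simp [hc]

-- both generations agree: B's start index covers exactly pvCanon
lemma pvGen_eq (name_list q desc_list : List String) :
    pvBLoop name_list q desc_list (if q ≠ [] then 1 else 0) ([], [])
      = (pvCanon q).foldl (pvF name_list desc_list) ([], []) := by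
  rcases eq_or_ne q [] with rfl | hq
  · rw [if_neg (by simp), pvBLoop_eq]
    simp [pvCanon, List.range']
  · rw [if_pos hq, pvBLoop_eq, pvCanon, if_neg hq]
    have h1 : q.length + 1 - 1 = q.length := by omega
    rw [h1]

-- ---- the prune loops ----

lemma pvPrune_skip (da db : List (List String)) (i : Nat)
    (h : ∀ j, i ≤ j → j < da.length → ¬ (da.length > 1 ∧ ((da.getD j []).length = 0 ∨ (db.getD j []).length = 0))) :
    pvPrune i da db = (da, db) := by
  unfold pvPrune
  by_cases hi : i < da.length
  · rw [if_pos hi, if_neg (h i le_rfl hi)]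
    exact pvPrune_skip da db (i+1) (fun j hj => h j (by omega))
  · rw [if_neg hi]
termination_by da.length + 1 - i

lemma pvPrune_step (da db : List (List String)) (i : Nat) (hi : i < da.length)
    (hnc : ¬ (da.length > 1 ∧ ((da.getD i []).length = 0 ∨ (db.getD i []).length = 0))) :
    pvPrune i da db = pvPrune (i+1) da db := by
  conv_lhs => rw [pvPrune]
  rw [if_pos hi, if_neg hnc]

lemma pvPrune_advance (da db : List (List String)) (m : Nat) (hm : m ≤ da.length)
    (h : ∀ j, j < m → ¬ (da.length > 1 ∧ ((da.getD j []).length = 0 ∨ (db.getD j []).length = 0))) :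
    pvPrune 0 da db = pvPrune m da db := by
  induction m with
  | zero => rfl
  | succ n ih =>
    rw [ih (by omega) (fun j hj => h j (by omega)),
      pvPrune_step da db n (by omega) (h n (by omega))]

lemma pvLast_neg (db : List (List String)) (hdb : db ≠ []) :
    PySem.List.pyGetD db (-1) [] = db.getD (db.length - 1) [] := by
  have hn : 0 < db.length := List.length_pos_iff.mpr hdb
  simp only [PySem.List.pyGetD, PySem.List.pyGet?, PySem.List.pyIdx?]
  rw [if_neg (by omega), if_pos (by omega)]
  norm_num [List.getD_eq_getElem?_getD]

-- with the structural invariants of the generated lists, A's cursor/del loop is B's pop-last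
lemma pvPrune_eq_pop (da db : List (List String)) (hlen : da.length = db.length)
    (h1 : da.length > 1 → ∀ i, i < da.length → da.getD i [] ≠ [])
    (h2 : ∀ i, i + 1 < db.length → db.getD i [] ≠ []) :
    pvPrune 0 da db
      = if da.length > 1 ∧ PySem.List.pyGetD db (-1) [] = [] then (da.dropLast, db.dropLast) else (da, db) := by
  by_cases hc : da.length > 1 ∧ PySem.List.pyGetD db (-1) [] = []
  · rw [if_pos hc]
    obtain ⟨hgt, hlast⟩ := hc
    have hdb : db ≠ [] := by
      intro h
      rw [h] at hlen
      simp at hlen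
      rw [hlen] at hgt
      simp at hgt
    rw [pvLast_neg db hdb] at hlast
    have hnc : ∀ j, j < da.length - 1 → ¬ (da.length > 1 ∧ ((da.getD j []).length = 0 ∨ (db.getD j []).length = 0)) := by
      intro j hj hbad
      rcases hbad.2 with h | h
      · exact h1 hgt j (by omega) (by simpa [List.length_eq_zero_iff] using h)
      · exact h2 j (by rw [← hlen]; omega) (by simpa [List.length_eq_zero_iff] using h)
    rw [pvPrune_advance da db (da.length - 1) (by omega) hnc]
    conv_lhs => rw [pvPrune]
    rw [if_pos (by omega), if_pos ⟨hgt, Or.inr (by rw [hlen, hlast]; rfl)⟩]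
    conv_lhs => rw [pvPrune]
    have hlenerase : (da.eraseIdx (da.length - 1)).length = da.length - 1 := by
      rw [List.length_eraseIdx]
      rw [if_pos (by omega)]
    rw [if_neg (by rw [hlenerase]; omega)]
    rw [List.dropLast_eq_eraseIdx (xs := da) (i := da.length - 1) (by omega),
        List.dropLast_eq_eraseIdx (xs := db) (i := db.length - 1) (by omega), hlen]
  · rw [if_neg hc]
    apply pvPrune_skip
    intro j _ hj hbad
    obtain ⟨hgt, hor⟩ := hbad
    have hdb : db ≠ [] := by
      intro h
      rw [h] at hlen
      simp at hlen
      rw [hlen] at hgt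
      simp at hgt
    rcases hor with h | h
    · exact h1 hgt j hj (by simpa [List.length_eq_zero_iff] using h)
    · by_cases hlt : j + 1 < db.length
      · exact h2 j hlt (by simpa [List.length_eq_zero_iff] using h)
      · have hj' : j = db.length - 1 := by rw [← hlen]; rw [← hlen] at hlt; omega
        apply hc
        refine ⟨hgt, ?_⟩
        rw [pvLast_neg db hdb, ← hj']
        simpa [List.length_eq_zero_iff] using h

-- ---- invariants of the generated lists ----

lemma pvCanon_pairwise (q : List String) :
    (pvCanon q).Pairwise (fun a b => a.length < b.length) := by
  rcases eq_or_ne q [] with rfl | hq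
  · simp [pvCanon]
  · rw [pvCanon, if_neg hq, List.pairwise_map, List.pairwise_iff_getElem]
    intro i j hi hj hij
    simp only [List.length_range'] at hi hj
    simp only [List.getElem_range', List.length_take]
    omega

-- Pairwise is inherited by sublists (proved here to avoid a name dependency)
lemma pvSub_pairwise {A : Type} {R : A → A → Prop} {l1 l2 : List A}
    (h : l1.Sublist l2) (hp : l2.Pairwise R) : l1.Pairwise R := by
  induction h with
  | slnil => exact hp
  | cons a _ ih => exact ih (List.pairwise_cons.mp hp).2
  | cons₂ a hsub ih =>
    rcases List.pairwise_cons.mp hp with ⟨ha, hp'⟩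
    exact List.pairwise_cons.mpr ⟨fun x hx => ha x (hsub.subset hx), ih hp'⟩

lemma pvCanon_mem_nil (q : List String) (h : ([] : List String) ∈ pvCanon q) : q = [] := by
  rcases eq_or_ne q [] with rfl | hq
  · rfl
  · exfalso
    rw [pvCanon, if_neg hq, List.mem_map] at h
    obtain ⟨k, hk, htake⟩ := h
    rw [List.mem_range'] at hk
    have : (q.take k).length = k := by simp; omega
    rw [htake] at this
    simp at this
    omega

-- at most the last generated entry has an empty descriptive part
lemma pvGenInv (name_list desc_list q : List String) :
    let F := (pvCanon q).filter (fun d => d ++ pvFilt name_list desc_list d = name_list)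
    (F.length > 1 → ∀ i, i < F.length → F.getD i [] ≠ []) ∧
      (∀ i, i + 1 < (F.map (pvFilt name_list desc_list)).length
        → (F.map (pvFilt name_list desc_list)).getD i [] ≠ []) := by
  intro F
  have hsub : F.Sublist (pvCanon q) := List.filter_sublist
  have hpw : F.Pairwise (fun a b => a.length < b.length) := pvSub_pairwise hsub (pvCanon_pairwise q)
  constructor
  · intro hgt i hi hnil
    rw [List.getD_eq_getElem _ _ hi] at hnil
    have hmem : ([] : List String) ∈ pvCanon q := by
      rw [← hnil]
      exact hsub.subset (F.getElem_mem hi)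
    have hq := pvCanon_mem_nil q hmem
    have : F.length ≤ 1 := by
      have : (pvCanon q).length = 1 := by rw [hq]; rfl
      calc F.length ≤ (pvCanon q).length := hsub.length_le
        _ = 1 := this
    omega
  · intro i hi hnil
    simp only [List.length_map] at hi
    rw [List.getD_eq_getElem _ _ (by simp; omega), List.getElem_map] at hnil
    -- F[i] ++ [] = name_list, so F[i] = name_list; F[i+1] is longer yet also a prefix of name_list
    have hci : F[i] ++ pvFilt name_list desc_list F[i] = name_list := by
      have := List.of_mem_filter (F.getElem_mem (show i < F.length by omega))
      simpa using this
    have hname : F[i] = name_list := by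
      rw [hnil] at hci
      simpa using hci
    have hcj : F[i+1] ++ pvFilt name_list desc_list F[i+1] = name_list := by
      have := List.of_mem_filter (F.getElem_mem hi)
      simpa using this
    have hlenle : F[i+1].length ≤ name_list.length := by
      rw [← hcj]
      simp
    have hlt : F[i].length < F[i+1].length :=
      List.pairwise_iff_getElem.mp hpw i (i+1) (by omega) hi (by omega)
    rw [hname] at hlt
    omega

-- ===== main equality =====

theorem pv_main (name_list dist_list desc_list : List String) :
    list_distinctive_descriptive name_list dist_list desc_list
      = list_distinctive_descriptive_alt name_list dist_list desc_list := by
  simp only [list_distinctive_descriptive, list_distinctive_descriptive_alt]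
  rw [pvTmpA_eq]
  have hAfold := pvA_fold name_list desc_list (pvCanon dist_list)
  simp only [show (fun dist => name_list.filter (fun i => !dist.contains i && desc_list.contains i))
    = pvFilt name_list desc_list from rfl] at hAfold ⊢
  rw [hAfold, pvGen_eq, pvFoldF_filter]
  set F := (pvCanon dist_list).filter (fun d => d ++ pvFilt name_list desc_list d = name_list) with hF
  simp only [List.nil_append]
  obtain ⟨h1, h2⟩ := pvGenInv name_list desc_list dist_list
  rw [pvPrune_eq_pop F (F.map (pvFilt name_list desc_list)) (by simp) h1 h2]
  by_cases hc : F.length > 1 ∧ PySem.List.pyGetD (F.map (pvFilt name_list desc_list)) (-1) [] = []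
  · rw [if_pos hc]
    have hgt := hc.1
    have hne : F.dropLast ≠ [] := by
      intro h
      have hlen2 := congrArg List.length h
      simp only [List.length_dropLast, List.length_nil] at hlen2
      omega
    rw [if_neg (fun hbad => hne (List.length_eq_zero_iff.mp hbad.1)), if_neg hne]
  · rw [if_neg hc]
    by_cases hF0 : F = []
    · rw [if_pos (by simp [hF0]), if_pos hF0]
    · rw [if_neg (by simp [List.length_eq_zero_iff, hF0]), if_neg hF0]

-- ===== VERDICT (by name: the statement is the Claim_ definition above) =====
theorem list_distinctive_descriptive_spec : Claim_equal_list_distinctive_descriptive := by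
  intro name_list dist_list desc_list _
  unfold Spec_list_distinctive_descriptive
  exact pv_main name_list dist_list desc_list
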